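-- pv_equiv track=rewrite | github.com/alcomist/python-cote_cheatsheet | codes/programmers/150369.py | solution
-- ===== SOURCE A (Python) =====
-- def solution(cap, n, deliveries, pickups):
--     answer = 0
--
--     deliveries = deliveries[::-1]
--     pickups = pickups[::-1]
--
--     delivery_count = 0
--     pickup_count = 0
--
--     for i in range(n):
--         delivery_count += deliveries[i]
--         pickup_count += pickups[i]
--
--         while delivery_count > 0 or pickup_count > 0:
--             delivery_count -= cap
--             pickup_count -= cap
--
--             answer += (n-i)*2
--
--     return answer
-- ===== SOURCE B (Python) =====
-- def solution(cap, n, deliveries, pickups):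
--     answer = 0
--     dc = pc = 0
--     for dist, (d, p) in zip(range(n, 0, -1), zip(reversed(deliveries), reversed(pickups))):
--         dc += d
--         pc += p
--         trips = max(0, -(-dc // cap), -(-pc // cap))
--         dc -= trips * cap
--         pc -= trips * cap
--         answer += trips * dist * 2
--     return answer
-- ===== Notes on version B (the rewrite author's own statement) =====
-- stated objective: alternative
-- what changed: Replaces A's inner while loop (one round trip subtracted per cap of cargo) with a per-house ceiling-division trip count, and iterates the reversed lists with zip instead of indexing reversed copies.
-- outside the precondition, e.g. on solution(-2, 1, [-3], [0]): A returns 0, B returns 4; on solution(0, 1, [0], [0]): A returns 0, B raises ZeroDivisionError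
import Mathlib
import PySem

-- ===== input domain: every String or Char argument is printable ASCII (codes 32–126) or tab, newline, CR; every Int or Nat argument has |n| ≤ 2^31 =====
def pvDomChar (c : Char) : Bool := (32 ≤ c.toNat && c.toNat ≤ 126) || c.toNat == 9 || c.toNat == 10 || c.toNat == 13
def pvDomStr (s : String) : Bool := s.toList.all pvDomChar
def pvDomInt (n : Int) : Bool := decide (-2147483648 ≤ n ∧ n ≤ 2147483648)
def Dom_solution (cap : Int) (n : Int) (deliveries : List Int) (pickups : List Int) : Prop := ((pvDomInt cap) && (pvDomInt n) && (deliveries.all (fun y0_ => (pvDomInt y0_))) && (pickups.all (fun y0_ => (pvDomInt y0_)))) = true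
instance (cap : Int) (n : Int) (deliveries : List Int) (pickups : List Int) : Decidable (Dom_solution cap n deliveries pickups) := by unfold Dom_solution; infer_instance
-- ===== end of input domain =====

-- B replaces A's inner while loop (one round trip subtracted per cap of cargo) by a
-- per-house ceiling-division trip count, and walks the reversed lists with zip instead of
-- indexing reversed copies; its work per house no longer depends on the cargo amounts.

-- ===== PORT A =====
-- A's inner 'while delivery_count > 0 or pickup_count > 0' loop; the fuel argument only
-- makes the recursion total (Python's loop terminates for every cap ≥ 1, see Pre_solution).
def solGo (cap inc : Int) : Nat → Int → Int → Int → Int × Int × Int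
  | 0, d, p, ans => (d, p, ans)
  | Nat.succ f, d, p, ans =>
    if 0 < d ∨ 0 < p then solGo cap inc f (d - cap) (p - cap) (ans + inc)
    else (d, p, ans)

def solution (cap : Int) (n : Int) (deliveries : List Int) (pickups : List Int) : Int :=
  let ds := (PySem.List.slice? deliveries none none (-1)).getD []   -- deliveries[::-1]
  let ps := (PySem.List.slice? pickups none none (-1)).getD []      -- pickups[::-1]
  let s := (PySem.List.pyRange 0 n 1).foldl (fun s i =>
      let d := s.1 + PySem.List.pyGetD ds i 0
      let p := s.2.1 + PySem.List.pyGetD ps i 0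
      solGo cap ((n - i) * 2) (d.toNat + p.toNat) d p s.2.2) (0, 0, 0)
  s.2.2

-- ===== PORT B =====
def solution_alt (cap : Int) (n : Int) (deliveries : List Int) (pickups : List Int) : Int :=
  let triples := (PySem.List.pyRange n 0 (-1)).zip (deliveries.reverse.zip pickups.reverse)
  let s := triples.foldl (fun s t =>
      let d := s.1 + t.2.1
      let p := s.2.1 + t.2.2
      let trips := max 0 (max (-(PySem.Int.floordiv (-d) cap)) (-(PySem.Int.floordiv (-p) cap)))
      (d - trips * cap, p - trips * cap, s.2.2 + trips * t.1 * 2)) (0, 0, 0)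
  s.2.2

-- ===== PRECONDITION & SPEC =====
-- Pre_ excludes cap ≤ 0 — there A's while loop diverges as soon as any running count is
-- positive, and the few returning inputs are accidents of the never-entered loop (B's
-- ceiling division raises or yields spurious trips there) — and n larger than a list's
-- length, where A raises IndexError.
def Pre_solution (cap : Int) (n : Int) (deliveries : List Int) (pickups : List Int) : Prop :=
  1 ≤ cap ∧ n ≤ deliveries.length ∧ n ≤ pickups.length
instance (cap : Int) (n : Int) (deliveries : List Int) (pickups : List Int) : Decidable (Pre_solution cap n deliveries pickups) := by unfold Pre_solution; infer_instance

def pvWitness_solution : Int × Int × List Int × List Int := (2, 2, [1, 3], [0, 2])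

def Spec_solution (cap : Int) (n : Int) (deliveries : List Int) (pickups : List Int) (out : Int) : Prop := out = solution_alt cap n deliveries pickups
instance (cap : Int) (n : Int) (deliveries : List Int) (pickups : List Int) (out : Int) : Decidable (Spec_solution cap n deliveries pickups out) := by unfold Spec_solution; infer_instance

-- ===== CLAIM (what is proved, stated in full; the proofs are below) =====
def Claim_equal_solution : Prop := ∀ (cap : Int) (n : Int) (deliveries : List Int) (pickups : List Int), Dom_solution cap n deliveries pickups → Pre_solution cap n deliveries pickups → Spec_solution cap n deliveries pickups (solution cap n deliveries pickups)

-- ===== LEMMAS AND PROOFS =====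

-- ceil(x / cap) as both programs' arithmetic writes it, and the trip count of one house
def pvCeil (cap x : Int) : Int := -(PySem.Int.floordiv (-x) cap)
def pvTrips (cap d p : Int) : Int := max 0 (max (pvCeil cap d) (pvCeil cap p))

lemma pvCeil_char (cap x : Int) (hcap : 0 < cap) :
    (pvCeil cap x - 1) * cap < x ∧ x ≤ pvCeil cap x * cap := by
  exact (PySem.Int.neg_floordiv_neg_eq_iff_of_pos hcap).mp rfl

lemma pvCeil_nonpos (cap x : Int) (hcap : 0 < cap) (hx : x ≤ 0) : pvCeil cap x ≤ 0 := by
  rcases pvCeil_char cap x hcap with ⟨h1, _⟩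
  nlinarith

lemma pvCeil_pos (cap x : Int) (hcap : 0 < cap) (hx : 0 < x) : 1 ≤ pvCeil cap x := by
  rcases pvCeil_char cap x hcap with ⟨_, h2⟩
  nlinarith

lemma pvCeil_le_self (cap x : Int) (hcap : 1 ≤ cap) (hx : 1 ≤ pvCeil cap x) :
    pvCeil cap x ≤ x := by
  rcases pvCeil_char cap x (by omega) with ⟨h1, _⟩
  nlinarith

lemma pvCeil_sub_cap (cap x : Int) (hcap : 0 < cap) :
    pvCeil cap (x - cap) = pvCeil cap x - 1 := by
  rcases pvCeil_char cap x hcap with ⟨h1, h2⟩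
  unfold pvCeil at h1 h2 ⊢
  rw [PySem.Int.neg_floordiv_neg_eq_iff_of_pos hcap]
  constructor <;> nlinarith

lemma pvTrips_fuel (cap d p : Int) (hcap : 1 ≤ cap) :
    (pvTrips cap d p).toNat ≤ d.toNat + p.toNat := by
  have hd : 1 ≤ pvCeil cap d → pvCeil cap d ≤ d := pvCeil_le_self cap d hcap
  have hp : 1 ≤ pvCeil cap p → pvCeil cap p ≤ p := pvCeil_le_self cap p hcap
  unfold pvTrips
  omega

lemma solGo_closed (cap inc : Int) (hcap : 1 ≤ cap) :
    ∀ (fuel : Nat) (d p ans : Int), (pvTrips cap d p).toNat ≤ fuel →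
      solGo cap inc fuel d p ans
        = (d - pvTrips cap d p * cap, p - pvTrips cap d p * cap, ans + pvTrips cap d p * inc) := by
  intro fuel
  induction fuel with
  | zero =>
    intro d p ans hf
    have ht : pvTrips cap d p = 0 := by unfold pvTrips at *; omega
    simp [solGo, ht]
  | succ f ih =>
    intro d p ans hf
    by_cases hg : 0 < d ∨ 0 < p
    · have h1 : 1 ≤ pvTrips cap d p := by
        rcases hg with h | h
        · have := pvCeil_pos cap d (by omega) h
          unfold pvTrips; omega
        · have := pvCeil_pos cap p (by omega) h
          unfold pvTrips; omega
      have hstep : pvTrips cap (d - cap) (p - cap) = pvTrips cap d p - 1 := by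
        unfold pvTrips at *
        rw [pvCeil_sub_cap cap d (by omega), pvCeil_sub_cap cap p (by omega)]
        omega
      rw [solGo, if_pos hg, ih (d - cap) (p - cap) (ans + inc) (by rw [hstep]; omega), hstep]
      simp only [Prod.mk.injEq]
      refine ⟨by ring, by ring, by ring⟩
    · rcases not_or.mp hg with ⟨hd0, hp0⟩
      have ht : pvTrips cap d p = 0 := by
        have h1 := pvCeil_nonpos cap d (by omega) (by omega)
        have h2 := pvCeil_nonpos cap p (by omega) (by omega)
        unfold pvTrips; omega
      rw [solGo, if_neg hg]
      simp [ht]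

-- the triple list B iterates over, rewritten as a map over A's index range
lemma zip_eq_map (n : Int) (rds rps : List Int) (hd : n ≤ rds.length) (hp : n ≤ rps.length) :
    (PySem.List.pyRange n 0 (-1)).zip (rds.zip rps)
      = (PySem.List.pyRange 0 n 1).map
          (fun i => (n - i, (PySem.List.pyGetD rds i 0, PySem.List.pyGetD rps i 0))) := by
  apply List.ext_getElem
  · simp [PySem.List.pyRange_neg_one, PySem.List.length_pyRange_one]
    omega
  · intro k h1 h2
    have hk : k < n.toNat := by
      simpa [PySem.List.length_pyRange_one] using h2
    have hkd : k < rds.length := by omega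
    have hkp : k < rps.length := by omega
    simp [PySem.List.pyRange_neg_one, PySem.List.getElem_pyRange_one,
      PySem.List.pyGetD_natCast, List.getD_eq_getElem?_getD, hkd, hkp]
-- ===== VERDICT (by name: the statement is the Claim_ definition above) =====
theorem solution_spec : Claim_equal_solution := by
  intro cap n deliveries pickups _ hpre
  rcases hpre with ⟨hcap, hd, hp⟩
  unfold Spec_solution solution solution_alt
  simp only [PySem.List.slice?_none_none_neg_one, Option.getD_some]
  rw [zip_eq_map n deliveries.reverse pickups.reverse (by simpa using hd) (by simpa using hp),
    List.foldl_map]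
  congr 2
  apply PySem.List.foldl_congr_mem
  intro acc i _
  dsimp only
  rw [solGo_closed cap ((n - i) * 2) hcap _ _ _ _ (pvTrips_fuel cap _ _ hcap)]
  unfold pvTrips pvCeil
  simp only [Prod.mk.injEq]
  refine ⟨trivial, trivial, by ring⟩
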